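-- pv_equiv track=rewrite | github.com/SeungAhSon/Baekjoon | 백준/Gold/9019. DSLR/DSLR.py | bfs
-- ===== SOURCE A (Python) =====
-- from collections import deque
--
-- def bfs(A,B):
--   visited = [0] * 10000
--   visited[A] = 1
--   Queue = deque([(A,'')])
--
--   while Queue:
--     A_temp, ans = Queue.popleft()
--     if A_temp==B:  return ans
--
--     if not visited[2*A_temp%10000]: #D
--       visited[2*A_temp%10000]=1
--       Queue.append((2*A_temp%10000, ans+'D'))
--
--     if not visited[(A_temp-1) % 10000]: #S
--       visited[(A_temp-1) % 10000]=1
--       Queue.append(((A_temp-1) % 10000, ans+'S'))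
--
--     if not visited[A_temp%1000*10+A_temp//1000]: #L
--       visited[A_temp%1000*10+A_temp//1000]=1
--       Queue.append((A_temp%1000*10+A_temp//1000, ans+'L'))
--
--     if not visited[int(A_temp%10*1000+A_temp//10)]: #R
--       visited[A_temp%10*1000+A_temp//10]=1
--       Queue.append((A_temp%10*1000+A_temp//10, ans+'R'))
-- ===== SOURCE B (Python) =====
-- from collections import deque
--
-- def bfs(A, B):
--     visited = bytearray(10000)
--     visited[A] = 1
--     parent = {}  # node -> (previous node, move); set once when first discovered
--     q = deque([A])
--     while q:
--         n = q.popleft()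
--         if n == B:
--             moves = []
--             cur = n
--             while cur in parent:
--                 prev, mv = parent[cur]
--                 moves.append(mv)
--                 cur = prev
--             return ''.join(reversed(moves))
--         for nxt, mv in ((2 * n % 10000, 'D'), ((n - 1) % 10000, 'S'),
--                         (n % 1000 * 10 + n // 1000, 'L'),
--                         (n % 10 * 1000 + n // 10, 'R')):
--             if not visited[nxt]:
--                 visited[nxt] = 1
--                 parent[nxt] = (n, mv)
--                 q.append(nxt)
-- ===== Notes on version B (the rewrite author's own statement) =====
-- stated objective: alternative
-- what changed: Instead of carrying a growing command string with every queued state, B runs the same BFS over the 10000 register states keeping one parent/move pointer per discovered state (inner work table-driven) and reconstructs the answer string once when B is popped.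
-- outside the precondition, e.g. on bfs(-5, 3): A returns 'LSLDDDLDDDL', B returns 'LSLDDDLDDDL'; on bfs(-3000, -3): A returns 'L', B returns 'L'
import Mathlib
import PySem

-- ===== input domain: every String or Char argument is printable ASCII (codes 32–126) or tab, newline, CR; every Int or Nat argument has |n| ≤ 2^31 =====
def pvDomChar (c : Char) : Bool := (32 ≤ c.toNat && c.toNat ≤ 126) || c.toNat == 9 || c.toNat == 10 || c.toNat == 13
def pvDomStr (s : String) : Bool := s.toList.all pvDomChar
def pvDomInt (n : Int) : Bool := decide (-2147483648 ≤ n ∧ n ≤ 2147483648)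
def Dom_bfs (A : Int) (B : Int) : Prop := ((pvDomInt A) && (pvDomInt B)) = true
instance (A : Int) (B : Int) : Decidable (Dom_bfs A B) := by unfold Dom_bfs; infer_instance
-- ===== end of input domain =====

-- B replaces A's per-node answer strings by parent/move pointers with a single path
-- reconstruction at the end (alternative bookkeeping, same BFS); equivalence is about
-- the return value only (neither argument is mutated).

-- ===== PORT A =====
-- `visited` is the Python 10000-entry 0/1 list as an Array Bool.  A Python list access
-- `visited[i]` wraps a negative in-range index, so every access is at index
-- `(PySem.Int.mod i 10000).toNat` (exact for the indices this program produces, which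
-- lie in (-10000, 10000)).  The deque is ported as the standard two-list functional
-- queue: pop from `front`, push onto `back`, reverse `back` into `front` when `front`
-- runs out — the sequence of popped entries is exactly the deque's.  The queue holds
-- the RAW (possibly negative) node values, as in Python.
-- Fuel: every enqueue first marks one of the 10000 visited cells, so at most 10001
-- entries ever enter the queue; each fuel unit either pops one entry or rotates the
-- queue, so 40000 fuel is never exhausted on inputs satisfying Pre_ (outside Pre_
-- Python raises or returns None).
def bfs_loop : Nat → Int → Array Bool → List (Int × String) → List (Int × String) → String
  | 0, _, _, _, _ => ""
  | fuel + 1, B, visited, [], back =>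
    match back with
    | [] => ""          -- Python falls off the while loop and returns None (excluded by Pre_)
    | _ :: _ => bfs_loop fuel B visited back.reverse []
  | fuel + 1, B, visited, (a, ans) :: rest, back =>
    if a = B then ans
    else
      -- #D
      let d := PySem.Int.mod (2 * a) 10000
      let p1 : Array Bool × List (Int × String) :=
        if visited[(PySem.Int.mod d 10000).toNat]! = true then (visited, back)
        else (visited.set! (PySem.Int.mod d 10000).toNat true, (d, ans ++ "D") :: back)
      -- #S
      let s := PySem.Int.mod (a - 1) 10000
      let p2 : Array Bool × List (Int × String) :=
        if p1.1[(PySem.Int.mod s 10000).toNat]! = true then p1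
        else (p1.1.set! (PySem.Int.mod s 10000).toNat true, (s, ans ++ "S") :: p1.2)
      -- #L
      let l := PySem.Int.mod a 1000 * 10 + PySem.Int.floordiv a 1000
      let p3 : Array Bool × List (Int × String) :=
        if p2.1[(PySem.Int.mod l 10000).toNat]! = true then p2
        else (p2.1.set! (PySem.Int.mod l 10000).toNat true, (l, ans ++ "L") :: p2.2)
      -- #R
      let r := PySem.Int.mod a 10 * 1000 + PySem.Int.floordiv a 10
      let p4 : Array Bool × List (Int × String) :=
        if p3.1[(PySem.Int.mod r 10000).toNat]! = true then p3
        else (p3.1.set! (PySem.Int.mod r 10000).toNat true, (r, ans ++ "R") :: p3.2)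
      bfs_loop fuel B p4.1 rest p4.2

def bfs (A : Int) (B : Int) : String :=
  bfs_loop 40000 B ((Array.replicate 10000 false).set! (PySem.Int.mod A 10000).toNat true)
    [(A, "")] []

-- ===== PORT B =====
-- the four (successor, move) pairs the for-loop of Source B iterates over
def moveTable (n : Int) : List (Int × String) :=
  [(PySem.Int.mod (2 * n) 10000, "D"),
   (PySem.Int.mod (n - 1) 10000, "S"),
   (PySem.Int.mod n 1000 * 10 + PySem.Int.floordiv n 1000, "L"),
   (PySem.Int.mod n 10 * 1000 + PySem.Int.floordiv n 10, "R")]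

-- Source B's parent dict as an association list (keys are node values; a key is inserted
-- at most once — only when its visited cell is first set — so the keys are distinct and
-- first-match lookup is exact; the dict is never iterated, so insertion order is unused)
def parGet : List (Int × (Int × String)) → Int → Option (Int × String)
  | [], _ => none
  | (k, w) :: t, x => if k = x then some w else parGet t x

-- the reconstruction loop `while cur in parent: …` of Source B, collecting moves backwards
def collectMoves : Nat → List (Int × (Int × String)) → Int → List String
  | 0, _, _ => []
  | f + 1, parent, cur =>
    match parGet parent cur with
    | none => []
    | some (prev, mv) => mv :: collectMoves f parent prev

-- one pass of Source B's inner for-loop body; the `visited` bytearray is accessed at the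
-- wrapped index (as in port A), the parent dict is the lookup function keyed by the
-- raw node value
def bfs_alt_step (n : Int) (st : Array Bool × List (Int × (Int × String)) × List Int)
    (e : Int × String) : Array Bool × List (Int × (Int × String)) × List Int :=
  if st.1[(PySem.Int.mod e.1 10000).toNat]! = true then st
  else (st.1.set! (PySem.Int.mod e.1 10000).toNat true,
        (e.1, (n, e.2)) :: st.2.1,
        e.1 :: st.2.2)

-- same queue representation and fuel discipline as bfs_loop (see the comment there)
def bfs_alt_loop : Nat → Int → Array Bool → List (Int × (Int × String)) →
    List Int → List Int → String
  | 0, _, _, _, _, _ => ""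
  | fuel + 1, B, visited, parent, [], back =>
    match back with
    | [] => ""
    | _ :: _ => bfs_alt_loop fuel B visited parent back.reverse []
  | fuel + 1, B, visited, parent, n :: rest, back =>
    if n = B then PySem.Str.join "" (collectMoves 40000 parent n).reverse
    else
      let st := (moveTable n).foldl (bfs_alt_step n) (visited, parent, back)
      bfs_alt_loop fuel B st.1 st.2.1 rest st.2.2

def bfs_alt (A : Int) (B : Int) : String :=
  bfs_alt_loop 40000 B ((Array.replicate 10000 false).set! (PySem.Int.mod A 10000).toNat true)
    [] [A] []

-- ===== PRECONDITION & SPEC =====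
-- Pre_ is the natural domain of Baekjoon 9019 (two register states 0 ≤ A,B < 10000),
-- plus the trivial diagonal for in-range negative indices.  Outside it: A ≥ 10000 or
-- A < -10000 raises IndexError at `visited[A] = 1`; B outside [0,10000) with B ≠ A makes
-- the while loop terminate without a return, so Python yields None, not a string; and for
-- -10000 ≤ A < 0 with A ≠ B the negative index wraps around, pre-marking the visited cell
-- of state A+10000, and whether the search then returns a string or falls through to None
-- for a given B depends on accidental BFS timing (not closed-form), so that whole region
-- is excluded even though A and B agree on the inputs where A does return a string
-- (e.g. (-5, 3) or (-3000, -3), see the cited examples).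
def Pre_bfs (A : Int) (B : Int) : Prop :=
  (0 ≤ A ∧ A < 10000 ∧ 0 ≤ B ∧ B < 10000) ∨ (-10000 ≤ A ∧ A < 0 ∧ B = A)
instance (A : Int) (B : Int) : Decidable (Pre_bfs A B) := by unfold Pre_bfs; infer_instance
def pvWitness_bfs : Int × Int := (1234, 3412)

def Spec_bfs (A : Int) (B : Int) (out : String) : Prop := out = bfs_alt A B
instance (A : Int) (B : Int) (out : String) : Decidable (Spec_bfs A B out) := by
  unfold Spec_bfs; infer_instance

-- ===== CLAIM (what is proved, stated in full; the proofs are below) =====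
def Claim_equal_bfs : Prop := ∀ (A : Int) (B : Int), Dom_bfs A B → Pre_bfs A B → Spec_bfs A B (bfs A B)

-- ===== LEMMAS AND PROOFS =====

-- the visited array read as a predicate on raw node values (wrapped index)
def aview (v : Array Bool) (x : Int) : Bool := v[(PySem.Int.mod x 10000).toNat]!

-- the parent association list read as a lookup function
def pfun (parl : List (Int × (Int × String))) : Int → Option (Int × String) :=
  fun x => parGet parl x

-- collectMoves over an abstract parent lookup function (proof-layer view)
def collectF : Nat → (Int → Option (Int × String)) → Int → List String
  | 0, _, _ => []
  | f + 1, par, cur =>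
    match par cur with
    | none => []
    | some (prev, mv) => mv :: collectF f par prev

-- A's answer string for a node, read off B's parent pointers
def pathF (par : Int → Option (Int × String)) (n : Int) : String :=
  PySem.Str.join "" (collectF 40000 par n).reverse

-- A's loop body is the fold of this step function over the move table (proof-layer view)
def stA (ans : String) (st : Array Bool × List (Int × String)) (e : Int × String) :
    Array Bool × List (Int × String) :=
  if st.1[(PySem.Int.mod e.1 10000).toNat]! = true then st
  else (st.1.set! (PySem.Int.mod e.1 10000).toNat true, (e.1, ans ++ e.2) :: st.2)

-- the parent chain from n: each link is a parent entry whose key is visited, and the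
-- chain ends (at the start node, which has no parent entry) within k links
def goodChain (vis : Int → Bool) (par : Int → Option (Int × String)) : Nat → Int → Prop
  | 0, n => par n = none
  | k + 1, n => par n = none ∨
      ∃ p mv, par n = some (p, mv) ∧ vis p = true ∧ goodChain vis par k p

-- coupling invariant between A's and B's loop states over the shared visited array,
-- B's parent map and the back queue (the mapped front queue is threaded in `couple`)
def BfsInv (K : Nat) (a : Int) (ans : String) (v : Array Bool)
    (par : Int → Option (Int × String)) (bB : List Int) : Prop :=
  v.size = 10000 ∧
  (∀ x ∈ bB, aview v x = true) ∧
  (∀ x, aview v x = true → goodChain (aview v) par (K + 1) x) ∧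
  (∀ x, (par x).isSome = true → aview v x = true) ∧
  goodChain (aview v) par K a ∧
  aview v a = true ∧
  pathF par a = ans

lemma modb (x : Int) : 0 ≤ PySem.Int.mod x 10000 ∧ PySem.Int.mod x 10000 < 10000 :=
  ⟨PySem.Int.mod_nonneg x (b := 10000) (by omega), PySem.Int.mod_lt x (b := 10000) (by omega)⟩

lemma aview_set (v : Array Bool) (hs : v.size = 10000) (m x : Int) :
    aview (v.set! (PySem.Int.mod m 10000).toNat true) x
      = if PySem.Int.mod x 10000 = PySem.Int.mod m 10000 then true else aview v x := by
  have hm : (PySem.Int.mod m 10000).toNat < v.size := by have := modb m; omega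
  have hx : (PySem.Int.mod x 10000).toNat < v.size := by have := modb x; omega
  unfold aview
  rw [Array.set!_eq_setIfInBounds]
  rw [getElem!_pos (v.setIfInBounds (PySem.Int.mod m 10000).toNat true)
        ((PySem.Int.mod x 10000).toNat) (by simpa using hx),
      getElem!_pos v ((PySem.Int.mod x 10000).toNat) hx]
  rw [Array.getElem_setIfInBounds]
  have h1 := modb m; have h2 := modb x
  split_ifs with ha hb hb
  · rfl
  · omega
  · omega
  · rfl

lemma size_set (v : Array Bool) (i : Nat) (b : Bool) : (v.set! i b).size = v.size := by
  simp

lemma bfs_loop_cons (fuel : Nat) (B : Int) (visited : Array Bool) (a : Int) (ans : String)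
    (rest back : List (Int × String)) :
    bfs_loop (fuel + 1) B visited ((a, ans) :: rest) back =
      if a = B then ans
      else bfs_loop fuel B ((moveTable a).foldl (stA ans) (visited, back)).1 rest
        ((moveTable a).foldl (stA ans) (visited, back)).2 := rfl

lemma bfs_loop_rotate (fuel : Nat) (B : Int) (visited : Array Bool) (y : Int × String)
    (ys : List (Int × String)) :
    bfs_loop (fuel + 1) B visited [] (y :: ys) =
      bfs_loop fuel B visited ((y :: ys).reverse) [] := rfl

lemma alt_loop_cons (fuel : Nat) (B : Int) (v : Array Bool)
    (parl : List (Int × (Int × String))) (a : Int) (rest back : List Int) :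
    bfs_alt_loop (fuel + 1) B v parl (a :: rest) back =
      if a = B then PySem.Str.join "" (collectMoves 40000 parl a).reverse
      else bfs_alt_loop fuel B ((moveTable a).foldl (bfs_alt_step a) (v, parl, back)).1
        ((moveTable a).foldl (bfs_alt_step a) (v, parl, back)).2.1 rest
        ((moveTable a).foldl (bfs_alt_step a) (v, parl, back)).2.2 := rfl

lemma alt_loop_rotate (fuel : Nat) (B : Int) (v : Array Bool)
    (parl : List (Int × (Int × String))) (y : Int) (ys : List Int) :
    bfs_alt_loop (fuel + 1) B v parl [] (y :: ys) =
      bfs_alt_loop fuel B v parl ((y :: ys).reverse) [] := rfl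

lemma join_empty_append (l : List String) (s : String) :
    PySem.Str.join "" (l ++ [s]) = PySem.Str.join "" l ++ s := by
  have hsp : ∀ L : List (List Char), (List.intersperse ([] : List Char) L).flatten = L.flatten := by
    intro L
    induction L with
    | nil => simp
    | cons a t ih => cases t <;> simp_all [List.intersperse]
  have hj : ∀ L : List (List Char), PySem.Chars.join [] L = L.flatten := by
    intro L; simp [PySem.Chars.join, List.intercalate, hsp]
  simp only [PySem.Str.join, String.toList_empty, List.map_append, List.map_cons, List.map_nil, hj]
  rw [List.flatten_append]
  simp

lemma alt_step_pos (n m : Int) (mv : String) (v : Array Bool)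
    (parl : List (Int × (Int × String))) (q : List Int)
    (hv : aview v m = true) :
    bfs_alt_step n (v, parl, q) (m, mv) = (v, parl, q) := by
  unfold bfs_alt_step
  rw [if_pos (show (v, parl, q).1[(PySem.Int.mod (m, mv).1 10000).toNat]! = true from hv)]

lemma alt_step_neg (n m : Int) (mv : String) (v : Array Bool)
    (parl : List (Int × (Int × String))) (q : List Int)
    (hv : aview v m = false) :
    bfs_alt_step n (v, parl, q) (m, mv) =
      (v.set! (PySem.Int.mod m 10000).toNat true, (m, (n, mv)) :: parl, m :: q) := by
  have hc : ¬((v, parl, q).1[(PySem.Int.mod (m, mv).1 10000).toNat]! = true) := by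
    show ¬(aview v m = true)
    rw [hv]; simp
  unfold bfs_alt_step
  rw [if_neg hc]

lemma pfun_cons (m : Int) (w : Int × String) (t : List (Int × (Int × String))) :
    pfun ((m, w) :: t) = fun j => if j = m then some w else pfun t j := by
  funext j
  show parGet ((m, w) :: t) j = _
  unfold parGet
  by_cases h : j = m
  · subst h; simp
  · rw [if_neg (fun e => h e.symm), if_neg h]; rfl

lemma collect_bridge : ∀ (f : Nat) (parl : List (Int × (Int × String))) (n : Int),
    collectMoves f parl n = collectF f (pfun parl) n := by
  intro f
  induction f with
  | zero => intro parl n; rfl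
  | succ f ih =>
    intro parl n
    show (match parGet parl n with
          | none => []
          | some (prev, mv) => mv :: collectMoves f parl prev) =
         (match pfun parl n with
          | none => []
          | some (prev, mv) => mv :: collectF f (pfun parl) prev)
    cases h : parGet parl n with
    | none => rw [show pfun parl n = none from h]
    | some w =>
      obtain ⟨prev, mv⟩ := w
      rw [show pfun parl n = some (prev, mv) from h]
      show mv :: collectMoves f parl prev = mv :: collectF f (pfun parl) prev
      rw [ih]

lemma stA_pos (ans : String) (v : Array Bool) (q : List (Int × String)) (m : Int) (mv : String)
    (hv : aview v m = true) :
    stA ans (v, q) (m, mv) = (v, q) := by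
  unfold stA
  rw [if_pos (show (v, q).1[(PySem.Int.mod (m, mv).1 10000).toNat]! = true from hv)]

lemma stA_neg (ans : String) (v : Array Bool) (q : List (Int × String)) (m : Int) (mv : String)
    (hv : aview v m = false) :
    stA ans (v, q) (m, mv) =
      (v.set! (PySem.Int.mod m 10000).toNat true, (m, ans ++ mv) :: q) := by
  have hc : ¬((v, q).1[(PySem.Int.mod (m, mv).1 10000).toNat]! = true) := by
    show ¬(aview v m = true)
    rw [hv]; simp
  unfold stA
  rw [if_neg hc]

lemma gc_succ {vis : Int → Bool} {par : Int → Option (Int × String)} :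
    ∀ (k : Nat) (n : Int), goodChain vis par k n → goodChain vis par (k + 1) n := by
  intro k
  induction k with
  | zero => intro n h; exact Or.inl h
  | succ k ih =>
    intro n h
    rcases h with h | ⟨p, mv, hp, hvp, hg⟩
    · exact Or.inl h
    · exact Or.inr ⟨p, mv, hp, hvp, ih p hg⟩

lemma gc_vis_mono {vis vis' : Int → Bool} {par : Int → Option (Int × String)}
    (hv : ∀ x, vis x = true → vis' x = true) :
    ∀ (k : Nat) (n : Int), goodChain vis par k n → goodChain vis' par k n := by
  intro k
  induction k with
  | zero => intro n h; exact h
  | succ k ih =>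
    intro n h
    rcases h with h | ⟨p, mv, hp, hvp, hg⟩
    · exact Or.inl h
    · exact Or.inr ⟨p, mv, hp, hv _ hvp, ih p hg⟩

lemma gc_update {vis : Int → Bool} {par : Int → Option (Int × String)} {m : Int}
    {v : Int × String} (hm : vis m = false) :
    ∀ (k : Nat) (n : Int), vis n = true → goodChain vis par k n →
      goodChain vis (fun j => if j = m then some v else par j) k n := by
  intro k
  induction k with
  | zero =>
    intro n hn h
    have hne : n ≠ m := by intro e; rw [e] at hn; rw [hn] at hm; exact absurd hm (by simp)
    have h' : par n = none := h
    show (if n = m then some v else par n) = none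
    simp [hne, h']
  | succ k ih =>
    intro n hn h
    have hne : n ≠ m := by intro e; rw [e] at hn; rw [hn] at hm; exact absurd hm (by simp)
    rcases h with h | ⟨p, mv, hp, hvp, hg⟩
    · exact Or.inl (by simp [hne, h])
    · exact Or.inr ⟨p, mv, by simp [hne, hp], hvp, ih p hvp hg⟩

lemma collect_succ {par : Int → Option (Int × String)} {m p : Int} {mv : String}
    (h : par m = some (p, mv)) (f : Nat) :
    collectF (f + 1) par m = mv :: collectF f par p := by
  simp [collectF, h]

lemma collect_fuel {vis : Int → Bool} {par : Int → Option (Int × String)} :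
    ∀ (k : Nat) (n : Int), goodChain vis par k n → ∀ f, k ≤ f →
      collectF f par n = collectF k par n := by
  intro k
  induction k with
  | zero =>
    intro n h f _
    have h' : par n = none := h
    cases f with
    | zero => rfl
    | succ f => simp [collectF, h']
  | succ k ih =>
    intro n h f hf
    cases f with
    | zero => omega
    | succ f =>
      rcases h with h | ⟨p, mv, hp, hvp, hg⟩
      · simp [collectF, h]
      · rw [collect_succ hp, collect_succ hp]
        rw [ih p hg f (by omega)]

lemma collect_update {vis : Int → Bool} {par : Int → Option (Int × String)} {m : Int}
    {v : Int × String} (hm : vis m = false) :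
    ∀ (k : Nat) (n : Int) (f : Nat), vis n = true →
      goodChain vis par k n →
      collectF f (fun j => if j = m then some v else par j) n = collectF f par n := by
  intro k
  induction k with
  | zero =>
    intro n f hn h
    have hne : n ≠ m := by intro e; rw [e] at hn; rw [hn] at hm; exact absurd hm (by simp)
    have h' : par n = none := h
    cases f with
    | zero => rfl
    | succ f => simp [collectF, hne, h']
  | succ k ih =>
    intro n f hn h
    have hne : n ≠ m := by intro e; rw [e] at hn; rw [hn] at hm; exact absurd hm (by simp)
    rcases h with h | ⟨p, mv, hp, hvp, hg⟩
    · cases f with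
      | zero => rfl
      | succ f => simp [collectF, hne, h]
    · cases f with
      | zero => rfl
      | succ f =>
        have hp' : (fun j => if j = m then some v else par j) n = some (p, mv) := by
          simp [hne, hp]
        rw [collect_succ hp', collect_succ hp]
        rw [ih p f hvp hg]

lemma fold_couple (a : Int) (K : Nat) (ans : String) (hK : K + 1 ≤ 40000) :
    ∀ (moves : List (Int × String)) (v : Array Bool) (parl : List (Int × (Int × String)))
      (bB : List Int), BfsInv K a ans v (pfun parl) bB →
      ∃ v' parl' bB',
        List.foldl (bfs_alt_step a) (v, parl, bB) moves = (v', parl', bB') ∧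
        List.foldl (stA ans) (v, bB.map fun n => (n, pathF (pfun parl) n)) moves
          = (v', bB'.map fun n => (n, pathF (pfun parl') n)) ∧
        BfsInv K a ans v' (pfun parl') bB' ∧
        (∀ x, aview v x = true → aview v' x = true) ∧
        (∀ n, aview v n = true → pathF (pfun parl') n = pathF (pfun parl) n) := by
  intro moves
  induction moves with
  | nil => intro v parl bB h; exact ⟨v, parl, bB, rfl, rfl, h, fun _ hx => hx, fun _ _ => rfl⟩
  | cons e ms ih =>
    obtain ⟨m, mv⟩ := e
    intro v parl bB h
    by_cases hv : aview v m = true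
    · rw [List.foldl_cons, List.foldl_cons, alt_step_pos a m mv v parl bB hv,
        stA_pos ans v _ m mv hv]
      exact ih v parl bB h
    · have hv' : aview v m = false := by
        cases hvv : aview v m with
        | true => exact absurd hvv hv
        | false => rfl
      obtain ⟨hsize, hqmem, hgcall, hkeys, hga, hva, hpa⟩ := h
      set v2 : Array Bool := v.set! (PySem.Int.mod m 10000).toNat true with hv2
      set parl2 : List (Int × (Int × String)) := (m, (a, mv)) :: parl with hparl2
      have hpar2 : pfun parl2 = fun j => if j = m then some (a, mv) else pfun parl j := by
        rw [hparl2]; exact pfun_cons m (a, mv) parl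
      have hvis2 : ∀ x, aview v2 x
          = if PySem.Int.mod x 10000 = PySem.Int.mod m 10000 then true else aview v x :=
        fun x => aview_set v hsize m x
      have hsize2 : v2.size = 10000 := by rw [hv2, size_set]; exact hsize
      have hmono : ∀ x, aview v x = true → aview v2 x = true := by
        intro x hx
        rw [hvis2 x]
        split_ifs <;> simp [hx]
      have hvm2 : aview v2 m = true := by rw [hvis2 m]; simp
      have hga2 : goodChain (aview v2) (pfun parl2) K a := by
        rw [hpar2]
        exact gc_vis_mono hmono K a (gc_update hv' K a hva hga)
      have hva2 : aview v2 a = true := hmono _ hva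
      have hpa2 : pathF (pfun parl2) a = ans := by
        rw [pathF, hpar2, collect_update hv' K a 40000 hva hga]; exact hpa
      have hparm : pfun parl2 m = some (a, mv) := by rw [hpar2]; simp
      have hpathm : pathF (pfun parl2) m = ans ++ mv := by
        rw [pathF, show (40000 : Nat) = 39999 + 1 by norm_num, collect_succ hparm]
        have e1 : collectF 39999 (pfun parl2) a = collectF 39999 (pfun parl) a := by
          rw [hpar2]; exact collect_update hv' K a 39999 hva hga
        have e2 : collectF 39999 (pfun parl) a = collectF K (pfun parl) a :=
          collect_fuel K a hga 39999 (by omega)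
        have e3 : collectF 40000 (pfun parl) a = collectF K (pfun parl) a :=
          collect_fuel K a hga 40000 (by omega)
        rw [e1, e2, ← e3]
        rw [List.reverse_cons, join_empty_append]
        rw [← pathF, hpa]
      have hpath2 : ∀ n, aview v n = true → pathF (pfun parl2) n = pathF (pfun parl) n := by
        intro n hn
        rw [pathF, pathF, hpar2, collect_update hv' (K + 1) n 40000 hn (hgcall n hn)]
      have hmapeq : (bB.map fun n => (n, pathF (pfun parl) n))
          = bB.map fun n => (n, pathF (pfun parl2) n) := by
        apply List.map_congr_left
        intro n hn
        rw [hpath2 n (hqmem n hn)]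
      have hstB : bfs_alt_step a (v, parl, bB) (m, mv) = (v2, parl2, m :: bB) := by
        rw [alt_step_neg a m mv v parl bB hv', ← hv2, ← hparl2]
      have hstA : stA ans (v, bB.map fun n => (n, pathF (pfun parl) n)) (m, mv)
          = (v2, (m :: bB).map fun n => (n, pathF (pfun parl2) n)) := by
        rw [stA_neg ans v _ m mv hv', ← hv2]
        rw [List.map_cons, hmapeq, hpathm]
      rw [List.foldl_cons, List.foldl_cons, hstB, hstA]
      have hinv2 : BfsInv K a ans v2 (pfun parl2) (m :: bB) := by
        refine ⟨hsize2, ?_, ?_, ?_, hga2, hva2, hpa2⟩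
        · intro x hx
          rcases List.mem_cons.mp hx with hx | hx
          · subst hx; exact hvm2
          · exact hmono _ (hqmem x hx)
        · intro x hx
          by_cases hxm : x = m
          · subst hxm
            exact Or.inr ⟨a, mv, hparm, hva2, hga2⟩
          · by_cases hpx : (pfun parl x).isSome = true
            · have hvx : aview v x = true := hkeys x hpx
              have h1 : goodChain (aview v) (pfun parl2) (K + 1) x := by
                rw [hpar2]
                exact gc_update (v := (a, mv)) hv' (K + 1) x hvx (hgcall x hvx)
              exact gc_vis_mono hmono (K + 1) x h1
            · have hnone : pfun parl x = none := by
                cases hpp : pfun parl x with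
                | none => rfl
                | some w => rw [hpp] at hpx; exact absurd rfl hpx
              · exact Or.inl (by rw [hpar2]; simp [hxm, hnone])
        · intro x hx
          by_cases hxm : x = m
          · subst hxm; exact hvm2
          · have : (pfun parl x).isSome = true := by
              rw [hpar2] at hx
              simpa [hxm] using hx
            exact hmono _ (hkeys x this)
      obtain ⟨v', parl', bB', hB1, hA1, hinv', hmono', hpath'⟩ := ih v2 parl2 (m :: bB) hinv2
      refine ⟨v', parl', bB', hB1, hA1, hinv', ?_, ?_⟩
      · intro x hx; exact hmono' x (hmono x hx)
      · intro n hn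
        rw [hpath' n (hmono n hn), hpath2 n hn]

lemma couple (Bv : Int) :
    ∀ (fuel : Nat) (K : Nat) (v : Array Bool) (parl : List (Int × (Int × String)))
      (fB bB : List Int),
      v.size = 10000 →
      K + fuel ≤ 40000 →
      (∀ x ∈ fB, aview v x = true) →
      (∀ x ∈ bB, aview v x = true) →
      (∀ x, aview v x = true → goodChain (aview v) (pfun parl) K x) →
      (∀ x, (pfun parl x).isSome = true → aview v x = true) →
      bfs_loop fuel Bv v (fB.map fun n => (n, pathF (pfun parl) n))
          (bB.map fun n => (n, pathF (pfun parl) n))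
        = bfs_alt_loop fuel Bv v parl fB bB := by
  intro fuel
  induction fuel with
  | zero => intro K v parl fB bB _ _ _ _ _ _; rfl
  | succ fuel ih =>
    intro K v parl fB bB hsize hK hfmem hbmem hgc hkeys
    cases fB with
    | nil =>
      cases bB with
      | nil => rfl
      | cons y ys =>
        rw [List.map_nil, List.map_cons, bfs_loop_rotate, alt_loop_rotate]
        have hfold : ((y, pathF (pfun parl) y) :: List.map (fun n => (n, pathF (pfun parl) n)) ys)
            = List.map (fun n => (n, pathF (pfun parl) n)) (y :: ys) := rfl
        rw [hfold, ← List.map_reverse]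
        exact ih K v parl (y :: ys).reverse [] hsize (by omega)
          (fun x hx => hbmem x (List.mem_reverse.mp hx)) (by simp) hgc hkeys
    | cons a rest =>
      rw [List.map_cons, bfs_loop_cons, alt_loop_cons]
      by_cases hB : a = Bv
      · simp only [hB, if_true]
        rw [pathF, collect_bridge]
      · simp only [hB, if_false]
        have hK1 : K + 1 ≤ 40000 := by omega
        have hva : aview v a = true := hfmem a List.mem_cons_self
        have hinv : BfsInv K a (pathF (pfun parl) a) v (pfun parl) bB :=
          ⟨hsize, hbmem, fun x hx => gc_succ K x (hgc x hx), hkeys,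
            hgc a hva, hva, rfl⟩
        obtain ⟨v', parl', bB', hB1, hA1, hinv', hmono', hpath'⟩ :=
          fold_couple a K (pathF (pfun parl) a) hK1 (moveTable a) v parl bB hinv
        rw [hB1, hA1]
        obtain ⟨hsize', hm', hg', hk', _, _, _⟩ := hinv'
        have hfront : rest.map (fun n => (n, pathF (pfun parl) n))
            = rest.map (fun n => (n, pathF (pfun parl') n)) := by
          apply List.map_congr_left
          intro n hn
          rw [hpath' n (hfmem n (List.mem_cons_of_mem _ hn))]
        rw [hfront]
        exact ih (K + 1) v' parl' rest bB' hsize' (by omega)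
          (fun x hx => hmono' x (hfmem x (List.mem_cons_of_mem _ hx))) hm' hg' hk'

-- ===== VERDICT (by name: the statement is the Claim_ definition above) =====
theorem bfs_spec : Claim_equal_bfs := by
  unfold Claim_equal_bfs
  intro A B _ _
  unfold Spec_bfs bfs bfs_alt
  set v0 : Array Bool := (Array.replicate 10000 false).set! (PySem.Int.mod A 10000).toNat true
    with hv0
  have hsize : v0.size = 10000 := by rw [hv0, size_set]; simp
  have hva : aview v0 A = true := by
    rw [hv0, aview_set (Array.replicate 10000 false) (by simp) A A]
    simp
  have hpnil : ∀ x, pfun [] x = none := fun _ => rfl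
  have hpath : pathF (pfun []) A = "" := by
    have hc : collectF 40000 (pfun []) A = [] := by
      rw [show (40000 : Nat) = 39999 + 1 by norm_num]
      simp [collectF, hpnil]
    simp [pathF, hc]
    rfl
  have h := couple B 40000 0 v0 [] [A] []
    hsize (by omega)
    (by intro x hx; simp at hx; subst hx; exact hva)
    (by intro x hx; simp at hx)
    (by intro x _; exact hpnil x)
    (by intro x hx; rw [hpnil x] at hx; simp at hx)
  simp only [List.map_cons, List.map_nil, hpath] at h
  exact h
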